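-- pv_equiv track=rewrite | github.com/binqian-c/STA-663-Waive-Documents | CS 111 Introduction to Computer Science I/ps3pr2.py | consonants_rec
-- ===== SOURCE A (Python) =====
-- def consonants_rec(s):
--     """ takes as input a string s and returns a list containing the consonants
--         (if any) in s
--         input s: an arbitrary string of lowercase letters
--     """
--     if s=='':
--         return []
--     else:
--         con_rest=consonants_rec(s[1:])
--         if s[0] in 'aeiou':
--             return con_rest
--         else:
--             return [s[0]]+con_rest
-- ===== SOURCE B (Python) =====
-- def consonants_rec(s):
--     """Iterative single pass with an accumulator instead of head/tail recursion."""
--     result = []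
--     for ch in s:
--         if ch not in 'aeiou':
--             result.append(ch)
--     return result
-- ===== Notes on version B (the rewrite author's own statement) =====
-- stated objective: faster
-- what changed: Replaces the head/tail recursion (which rebuilds the result by list concatenation on the way back up, and slices the string each call) with a single forward for-loop appending to an accumulator.
import Mathlib
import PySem

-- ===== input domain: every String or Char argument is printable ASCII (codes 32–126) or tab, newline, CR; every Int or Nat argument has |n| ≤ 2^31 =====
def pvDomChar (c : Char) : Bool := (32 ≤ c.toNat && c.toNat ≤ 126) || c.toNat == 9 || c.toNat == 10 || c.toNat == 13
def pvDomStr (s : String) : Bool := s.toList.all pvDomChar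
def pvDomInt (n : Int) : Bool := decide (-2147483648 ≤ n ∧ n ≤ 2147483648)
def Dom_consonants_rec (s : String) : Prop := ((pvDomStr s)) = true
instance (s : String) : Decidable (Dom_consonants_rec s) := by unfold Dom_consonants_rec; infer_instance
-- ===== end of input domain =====

-- B replaces A's head/tail recursion with one forward loop over the characters appending to an accumulator (simpler).

-- ===== PORT A =====
-- A recurses on the tail s[1:], then prepends s[0] when it is not a vowel.
def consonantsRecA : List Char → List String
  | [] => []
  | c :: rest =>
    let con_rest := consonantsRecA rest
    if PySem.Chars.isIn [c] ['a','e','i','o','u'] then con_rest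
    else [String.ofList [c]] ++ con_rest

def consonants_rec (s : String) : List String := consonantsRecA s.toList

-- ===== PORT B =====
-- B iterates forward over s, appending non-vowel characters to a result accumulator.
def consonants_rec_alt (s : String) : List String :=
  s.toList.foldl
    (fun result ch =>
      if ¬ PySem.Chars.isIn [ch] ['a','e','i','o','u'] then result ++ [String.ofList [ch]]
      else result)
    []

-- ===== PRECONDITION & SPEC =====
def Spec_consonants_rec (s : String) (out : List String) : Prop := out = consonants_rec_alt s
instance (s : String) (out : List String) : Decidable (Spec_consonants_rec s out) := by unfold Spec_consonants_rec; infer_instance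

-- ===== CLAIM (what is proved, stated in full; the proofs are below) =====
def Claim_equal_consonants_rec : Prop := ∀ (s : String), Dom_consonants_rec s → Spec_consonants_rec s (consonants_rec s)

-- ===== LEMMAS AND PROOFS =====
theorem consonants_foldl_eq (l : List Char) (acc : List String) :
    l.foldl
      (fun result ch =>
        if ¬ PySem.Chars.isIn [ch] ['a','e','i','o','u'] then result ++ [String.ofList [ch]]
        else result)
      acc = acc ++ consonantsRecA l := by
  induction l generalizing acc with
  | nil => simp [consonantsRecA]
  | cons c rest ih =>
    simp only [List.foldl_cons, consonantsRecA]
    rw [ih]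
    by_cases h : PySem.Chars.isIn [c] ['a','e','i','o','u'] = true
    · simp [h]
    · simp [h]

-- ===== VERDICT (by name: the statement is the Claim_ definition above) =====
theorem consonants_rec_spec : Claim_equal_consonants_rec := by
  intro s _
  unfold Spec_consonants_rec consonants_rec consonants_rec_alt
  rw [consonants_foldl_eq]
  simp
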